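-- pv_equiv track=rewrite | github.com/gageml/scout-otel | src/scout_otel/cli/spans.py | _prompt_completion
-- ===== SOURCE A (Python) =====
-- from collections.abc import Mapping, Sequence
-- from typing import Any
--
-- def _prompt_completion(attrs: Mapping[str, Any]) -> tuple[str, str, str, str]:
--     """Extract prompt and completion text from span attributes.
--
--     Returns (prompt_role, prompt_content, completion_role, completion_content).
--     """
--     prompt = ""
--     prompt_role = ""
--     completion = ""
--     completion_role = ""
--
--     # Find prompt content (look for user role first, then any)
--     for i in range(10):
--         role = attrs.get(f"gen_ai.prompt.{i}.role", "")
--         content = attrs.get(f"gen_ai.prompt.{i}.content", "")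
--         if content and role == "user":
--             prompt = content
--             prompt_role = role
--             break
--         if content and not prompt:
--             prompt = content
--             prompt_role = role
--
--     # Find completion content
--     for i in range(10):
--         role = attrs.get(f"gen_ai.completion.{i}.role", "")
--         content = attrs.get(f"gen_ai.completion.{i}.content", "")
--         if content:
--             completion = content
--             completion_role = role
--             break
--
--     return prompt_role, prompt, completion_role, completion
-- ===== SOURCE B (Python) =====
-- def _prompt_completion(attrs):
--     """Extract prompt and completion text from span attributes.
--
--     Returns (prompt_role, prompt_content, completion_role, completion_content).
--     """
--     prompt_pairs = [
--         (attrs.get(f"gen_ai.prompt.{i}.role", ""), attrs.get(f"gen_ai.prompt.{i}.content", ""))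
--         for i in range(10)
--         if attrs.get(f"gen_ai.prompt.{i}.content", "")
--     ]
--     prompt_role, prompt = next(
--         (p for p in prompt_pairs if p[0] == "user"),
--         prompt_pairs[0] if prompt_pairs else ("", ""),
--     )
--     completion_role, completion = next(
--         (
--             (attrs.get(f"gen_ai.completion.{i}.role", ""), attrs.get(f"gen_ai.completion.{i}.content", ""))
--             for i in range(10)
--             if attrs.get(f"gen_ai.completion.{i}.content", "")
--         ),
--         ("", ""),
--     )
--     return prompt_role, prompt, completion_role, completion
-- ===== Notes on version B (the rewrite author's own statement) =====
-- stated objective: simpler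
-- what changed: Replaces A's break/accumulator state-machine loops with a build-then-select decomposition: collect the nonempty (role, content) candidate pairs once, then pick the first 'user' pair (falling back to the first pair) for the prompt and the first pair for the completion.
import Mathlib
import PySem

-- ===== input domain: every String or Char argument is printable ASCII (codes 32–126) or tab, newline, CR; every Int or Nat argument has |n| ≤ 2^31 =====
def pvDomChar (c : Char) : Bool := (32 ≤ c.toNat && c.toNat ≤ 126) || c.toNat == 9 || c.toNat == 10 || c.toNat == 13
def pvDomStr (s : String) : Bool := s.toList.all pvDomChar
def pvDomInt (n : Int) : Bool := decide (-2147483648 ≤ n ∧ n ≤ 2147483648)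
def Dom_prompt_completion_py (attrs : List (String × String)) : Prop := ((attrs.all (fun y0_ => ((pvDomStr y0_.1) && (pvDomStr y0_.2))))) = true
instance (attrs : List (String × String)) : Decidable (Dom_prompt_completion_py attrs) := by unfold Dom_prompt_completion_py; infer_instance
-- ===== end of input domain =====

-- B replaces A's break/accumulator scan loops with a build-then-select decomposition
-- (collect candidate pairs, then pick first 'user' else first); objective: simpler.

-- attrs.get(k, "") — shared dict primitive for both ports
def pvGetAttr (attrs : List (String × String)) (k : String) : String :=
  (PySem.Dict.mk attrs).getD k ""

-- ===== PORT A =====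
-- the first for-loop of A: state (prompt, prompt_role), break on a nonempty 'user' pair
def pvPromptLoopA (attrs : List (String × String)) : List Int → String → String → String × String
  | [], p, pr => (pr, p)
  | i :: rest, p, pr =>
    let role := pvGetAttr attrs ("gen_ai.prompt." ++ PySem.Int.toStr i ++ ".role")
    let content := pvGetAttr attrs ("gen_ai.prompt." ++ PySem.Int.toStr i ++ ".content")
    if content ≠ "" ∧ role = "user" then (role, content)
    else if content ≠ "" ∧ p = "" then pvPromptLoopA attrs rest content role
    else pvPromptLoopA attrs rest p pr

-- the second for-loop of A: break on the first nonempty content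
def pvCompletionLoopA (attrs : List (String × String)) : List Int → String × String
  | [] => ("", "")
  | i :: rest =>
    let role := pvGetAttr attrs ("gen_ai.completion." ++ PySem.Int.toStr i ++ ".role")
    let content := pvGetAttr attrs ("gen_ai.completion." ++ PySem.Int.toStr i ++ ".content")
    if content ≠ "" then (role, content) else pvCompletionLoopA attrs rest

def prompt_completion_py (attrs : List (String × String)) : String × String × String × String :=
  let pp := pvPromptLoopA attrs (PySem.List.pyRange 0 10 1) "" ""
  let cc := pvCompletionLoopA attrs (PySem.List.pyRange 0 10 1)
  (pp.1, pp.2, cc.1, cc.2)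

-- ===== PORT B =====
-- the comprehension of Source B: candidate (role, content) pairs with nonempty content
def pvPairs (attrs : List (String × String)) (pre : String) (l : List Int) : List (String × String) :=
  l.filterMap (fun i =>
    let pr := (pvGetAttr attrs (pre ++ PySem.Int.toStr i ++ ".role"),
               pvGetAttr attrs (pre ++ PySem.Int.toStr i ++ ".content"))
    if pr.2 ≠ "" then some pr else none)

def prompt_completion_py_alt (attrs : List (String × String)) : String × String × String × String :=
  let prompt_pairs := pvPairs attrs "gen_ai.prompt." (PySem.List.pyRange 0 10 1)
  let pp := (prompt_pairs.find? (fun p => p.1 == "user")).getD (prompt_pairs.headD ("", ""))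
  let cc := (pvPairs attrs "gen_ai.completion." (PySem.List.pyRange 0 10 1)).headD ("", "")
  (pp.1, pp.2, cc.1, cc.2)

-- ===== PRECONDITION & SPEC =====
def Spec_prompt_completion_py (attrs : List (String × String)) (out : String × String × String × String) : Prop := out = prompt_completion_py_alt attrs
instance (attrs : List (String × String)) (out : String × String × String × String) : Decidable (Spec_prompt_completion_py attrs out) := by unfold Spec_prompt_completion_py; infer_instance

-- ===== CLAIM (what is proved, stated in full; the proofs are below) =====
def Claim_equal_prompt_completion_py : Prop := ∀ (attrs : List (String × String)), Dom_prompt_completion_py attrs → Spec_prompt_completion_py attrs (prompt_completion_py attrs)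

-- ===== LEMMAS AND PROOFS =====

-- once prompt is nonempty, A's loop only changes on a 'user' break = find? over the pairs
theorem pvPromptLoopA_ne (attrs : List (String × String)) (l : List Int) :
    ∀ p pr, p ≠ "" →
      pvPromptLoopA attrs l p pr
        = ((pvPairs attrs "gen_ai.prompt." l).find? (fun q => q.1 == "user")).getD (pr, p) := by
  induction l with
  | nil => intro p pr _; simp [pvPromptLoopA, pvPairs]
  | cons i rest ih =>
    intro p pr hp
    simp only [pvPromptLoopA, pvPairs, List.filterMap_cons]
    by_cases hc : pvGetAttr attrs ("gen_ai.prompt." ++ PySem.Int.toStr i ++ ".content") = ""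
    · simp [hc, ih p pr hp, pvPairs]
    · by_cases hr : pvGetAttr attrs ("gen_ai.prompt." ++ PySem.Int.toStr i ++ ".role") = "user"
      · simp [hc, hr]
      · simp [hc, hr, hp, ih p pr hp, pvPairs]

-- A's prompt loop from the initial empty state = first 'user' pair, else first pair
theorem pvPromptLoopA_eq (attrs : List (String × String)) (l : List Int) :
    pvPromptLoopA attrs l "" ""
      = ((pvPairs attrs "gen_ai.prompt." l).find? (fun q => q.1 == "user")).getD
          ((pvPairs attrs "gen_ai.prompt." l).headD ("", "")) := by
  induction l with
  | nil => simp [pvPromptLoopA, pvPairs]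
  | cons i rest ih =>
    simp only [pvPromptLoopA, pvPairs, List.filterMap_cons]
    by_cases hc : pvGetAttr attrs ("gen_ai.prompt." ++ PySem.Int.toStr i ++ ".content") = ""
    · simp [hc, ih, pvPairs]
    · by_cases hr : pvGetAttr attrs ("gen_ai.prompt." ++ PySem.Int.toStr i ++ ".role") = "user"
      · simp [hc, hr]
      · simp [hc, hr,
          pvPromptLoopA_ne attrs rest
            (pvGetAttr attrs ("gen_ai.prompt." ++ PySem.Int.toStr i ++ ".content"))
            (pvGetAttr attrs ("gen_ai.prompt." ++ PySem.Int.toStr i ++ ".role")) hc, pvPairs]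

-- A's completion loop = head of the candidate pairs
theorem pvCompletionLoopA_eq (attrs : List (String × String)) (l : List Int) :
    pvCompletionLoopA attrs l
      = (pvPairs attrs "gen_ai.completion." l).headD ("", "") := by
  induction l with
  | nil => simp [pvCompletionLoopA, pvPairs]
  | cons i rest ih =>
    simp only [pvCompletionLoopA, pvPairs, List.filterMap_cons]
    by_cases hc : pvGetAttr attrs ("gen_ai.completion." ++ PySem.Int.toStr i ++ ".content") = ""
    · simp [hc, ih, pvPairs]
    · simp [hc]

-- ===== VERDICT (by name: the statement is the Claim_ definition above) =====
theorem prompt_completion_py_spec : Claim_equal_prompt_completion_py := by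
  intro attrs _
  unfold Spec_prompt_completion_py prompt_completion_py prompt_completion_py_alt
  rw [pvPromptLoopA_eq, pvCompletionLoopA_eq]
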